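-- pv_equiv track=rewrite | github.com/jkworldchampion/algorithm | programmers/march_23/problem_1.py | solution
-- ===== SOURCE A (Python) =====
-- def solution(input_string):
--     # input_type = set(list(map(str, input_string)))
--     input_type = []
--     answer = []
--
--     for i in range(len(input_string)):
--         if input_string[i] in input_type:
--             if input_string[i-1] != input_string[i]:
--                 if input_string[i] in answer:
--                     continue
--                 else:
--                     answer.append(input_string[i])
--         else:
--             input_type.append(input_string[i])
--
--     answer.sort()
--     answer = "".join(answer)
--     if len(answer)==0:
--         answer = "N"
--
--     return answer
-- ===== SOURCE B (Python) =====
-- def solution(input_string):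
--     # Collapse into maximal runs, count run-heads, answer = chars heading >1 run.
--     runs = []
--     prev = None
--     for ch in input_string:
--         if ch != prev:
--             runs.append(ch)
--             prev = ch
--     counts = {}
--     for ch in runs:
--         counts[ch] = counts.get(ch, 0) + 1
--     dup = sorted(c for c, n in counts.items() if n > 1)
--     return "".join(dup) or "N"
-- ===== Notes on version B (the rewrite author's own statement) =====
-- stated objective: faster
-- what changed: Replaces the seen-set + answer-list membership scans over every character by collapsing the string into run-heads once, counting each character's runs with a dict, and keeping the characters with more than one run.
import Mathlib
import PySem

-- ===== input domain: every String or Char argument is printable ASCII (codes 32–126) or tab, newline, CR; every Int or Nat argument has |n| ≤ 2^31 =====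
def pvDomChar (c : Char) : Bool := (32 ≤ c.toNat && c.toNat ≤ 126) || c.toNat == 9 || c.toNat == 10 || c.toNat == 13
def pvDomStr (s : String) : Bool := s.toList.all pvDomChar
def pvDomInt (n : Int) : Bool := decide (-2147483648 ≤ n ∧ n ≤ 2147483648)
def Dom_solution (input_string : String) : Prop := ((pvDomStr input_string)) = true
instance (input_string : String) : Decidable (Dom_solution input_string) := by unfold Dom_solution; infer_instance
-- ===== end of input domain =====

-- B replaces A's seen-set + adjacency membership loop by collapsing the string into run-heads,
-- counting runs per character with a dict, and keeping the characters with more than one run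
-- (alternative decomposition; same return value).


-- ===== PORT A =====
-- one loop iteration of A (i ranges over range(len(s)), so both pyGetD accesses are
-- Python-exact: s[i] is in range, and s[i-1] wraps to the last element only when i = 0)
def stepA (s : List Char) (st : List Char × List Char) (i : Int) : List Char × List Char :=
  let c := PySem.List.pyGetD s i ' '
  if st.1.contains c then
    if PySem.List.pyGetD s (i - 1) ' ' ≠ c then
      if st.2.contains c then st else (st.1, st.2 ++ [c])
    else st
  else (st.1 ++ [c], st.2)

def solution (input_string : String) : String :=
  let s := input_string.toList
  let st := (PySem.List.pyRange 0 (s.length : Int) 1).foldl (stepA s) ([], [])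
  let ans := PySem.List.sorted st.2 (fun x => x) false
  let j := String.ofList ans
  if PySem.Str.len j == 0 then "N" else j

-- ===== PORT B =====
-- one iteration of B's run-collapsing loop (state: run-heads so far, previous char)
def runStep (st : List Char × Option Char) (ch : Char) : List Char × Option Char :=
  if some ch ≠ st.2 then (st.1 ++ [ch], some ch) else st

def solution_alt (input_string : String) : String :=
  let runs := (input_string.toList.foldl runStep ([], none)).1
  let counts := runs.foldl (fun (d : PySem.Dict Char Int) ch => d.insert ch (d.getD ch 0 + 1)) PySem.Dict.empty
  let dup := PySem.List.sorted (counts.items.filterMap (fun p => if p.2 > 1 then some p.1 else none)) (fun x => x) false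
  let j := String.ofList dup
  if PySem.Str.len j == 0 then "N" else j

-- ===== PRECONDITION & SPEC =====
def Spec_solution (input_string : String) (out : String) : Prop := out = solution_alt input_string
instance (input_string : String) (out : String) : Decidable (Spec_solution input_string out) := by unfold Spec_solution; infer_instance

-- ===== CLAIM (what is proved, stated in full; the proofs are below) =====
def Claim_equal_solution : Prop := ∀ (input_string : String), Dom_solution input_string → Spec_solution input_string (solution input_string)

-- ===== LEMMAS AND PROOFS =====

-- the joint loop invariant: after n steps, A's seen-set has exactly the members of B's
-- run-head list, A's answer holds exactly the characters heading ≥ 2 runs so far, and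
-- B's prev is the last char read (and is a run head)
theorem loop_inv (s : List Char) (n : Nat) (hn : n ≤ s.length) :
    (∀ c, c ∈ ((PySem.List.pyRange 0 (n : Int) 1).foldl (stepA s) ([], [])).1 ↔
          c ∈ ((s.take n).foldl runStep ([], none)).1) ∧
    (∀ c, c ∈ ((PySem.List.pyRange 0 (n : Int) 1).foldl (stepA s) ([], [])).2 ↔
          2 ≤ ((s.take n).foldl runStep ([], none)).1.count c) ∧
    ((PySem.List.pyRange 0 (n : Int) 1).foldl (stepA s) ([], [])).2.Nodup ∧
    ((s.take n).foldl runStep ([], none)).2 = (s.take n).getLast? ∧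
    (∀ x, ((s.take n).foldl runStep ([], none)).2 = some x →
          x ∈ ((s.take n).foldl runStep ([], none)).1) := by
  induction n with
  | zero =>
    simp [PySem.List.pyRange_one_eq_nil]
  | succ n ih =>
    have hn' : n ≤ s.length := by omega
    have hlt : n < s.length := by omega
    obtain ⟨ihT, ihA, ihN, ihP, ihPR⟩ := ih hn'
    have hrange : PySem.List.pyRange 0 ((n+1 : Nat) : Int) 1
        = PySem.List.pyRange 0 (n : Int) 1 ++ [(n : Int)] := by
      push_cast
      exact PySem.List.pyRange_one_succ_right (by positivity)
    have htake : s.take (n+1) = s.take n ++ [s[n]] := List.take_succ_eq_append_getElem hlt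
    rw [hrange, htake, List.foldl_append, List.foldl_append]
    set A := (PySem.List.pyRange 0 (n : Int) 1).foldl (stepA s) ([], []) with hA
    set B := (s.take n).foldl runStep ([], none) with hB
    simp only [List.foldl_cons, List.foldl_nil]
    have hc : PySem.List.pyGetD s (n : Int) ' ' = s[n] := by
      rw [PySem.List.pyGetD_natCast]; exact List.getD_eq_getElem _ _ hlt
    have hgl : (s.take n ++ [s[n]]).getLast? = some s[n] := List.getLast?_concat
    have hcnt : ∀ (l : List Char) (c : Char),
        (l ++ [s[n]]).count c = l.count c + (if c = s[n] then 1 else 0) := by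
      intro l c
      rw [List.count_append]
      by_cases h : c = s[n]
      · subst h; simp
      · rw [if_neg h]
        simp only [List.count_singleton]
        rw [if_neg (by simp; exact fun hh => h hh.symm), add_zero]
    have hmem_app : ∀ (l : List Char) (c : Char), c ∈ l ++ [s[n]] ↔ c ∈ l ∨ c = s[n] := by
      intro l c; simp
    have hprev_eq : 0 < n → B.2 = some s[n-1] := by
      intro hpos
      rw [ihP, List.getLast?_eq_getElem?]
      have hlen : (s.take n).length = n := by simp [hn']
      rw [hlen, List.getElem?_take, if_pos (by omega), List.getElem?_eq_getElem (by omega)]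
    have hprevA_eq : 0 < n → PySem.List.pyGetD s ((n : Int) - 1) ' ' = s[n-1] := by
      intro hpos
      have hcast : ((n : Int) - 1) = ((n - 1 : Nat) : Int) := by push_cast [hpos]; omega
      rw [hcast, PySem.List.pyGetD_natCast]
      exact List.getD_eq_getElem _ _ (by omega)
    by_cases hnew : some s[n] ≠ B.2
    · -- B starts a new run with head s[n]
      have hBstep : runStep B s[n] = (B.1 ++ [s[n]], some s[n]) := by
        simp [runStep, hnew]
      rw [hBstep]
      by_cases hmem : s[n] ∈ A.1
      · -- seen before and previous char differs: a non-adjacent repeat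
        have hmemR : s[n] ∈ B.1 := (ihT _).mp hmem
        have hpos : 0 < n := by
          by_contra h0
          have h0' : n = 0 := by omega
          subst h0'
          simp [hB] at hmemR
        have hprev : B.2 = some s[n-1] := hprev_eq hpos
        have hne : s[n-1] ≠ s[n] := fun h => hnew (by rw [hprev, h])
        have hAstep : stepA s A (n : Int)
            = if A.2.contains s[n] then A else (A.1, A.2 ++ [s[n]]) := by
          simp only [stepA, hc, hprevA_eq hpos]
          rw [if_pos (List.elem_eq_true_of_mem hmem), if_pos (by simpa using hne)]
        rw [hAstep]
        by_cases hans : s[n] ∈ A.2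
        · rw [if_pos (List.elem_eq_true_of_mem hans)]
          refine ⟨?_, ?_, ihN, by rw [hgl], ?_⟩
          · intro c
            rw [hmem_app]
            constructor
            · intro h; exact Or.inl ((ihT c).mp h)
            · rintro (h | rfl)
              · exact (ihT c).mpr h
              · exact hmem
          · intro c
            rw [hcnt]
            by_cases hcs : c = s[n]
            · subst hcs
              rw [if_pos rfl]
              constructor
              · intro _; have := (ihA _).mp hans; omega
              · intro _; exact hans
            · rw [if_neg hcs, add_zero]
              exact ihA c
          · intro x hx
            cases hx
            rw [hmem_app]; exact Or.inr rfl
        · rw [if_neg (by simp [hans])]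
          refine ⟨?_, ?_, ?_, by rw [hgl], ?_⟩
          · intro c
            rw [hmem_app]
            constructor
            · intro h; exact Or.inl ((ihT c).mp h)
            · rintro (h | rfl)
              · exact (ihT c).mpr h
              · exact hmem
          · intro c
            rw [hcnt, hmem_app]
            by_cases hcs : c = s[n]
            · subst hcs
              rw [if_pos rfl]
              have h1 : 1 ≤ B.1.count s[n] := List.count_pos_iff.mpr hmemR
              constructor
              · intro _; omega
              · intro _; exact Or.inr rfl
            · rw [if_neg hcs, add_zero]
              constructor
              · rintro (h | h)
                · exact (ihA c).mp h
                · exact absurd h hcs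
              · intro h; exact Or.inl ((ihA c).mpr h)
          · exact List.Nodup.append ihN (List.nodup_singleton _) (by simpa using hans)
          · intro x hx
            cases hx
            rw [hmem_app]; exact Or.inr rfl
      · -- first occurrence: A records it in its seen-set
        have hAstep : stepA s A (n : Int) = (A.1 ++ [s[n]], A.2) := by
          simp only [stepA, hc]
          rw [if_neg (by simp [hmem])]
        rw [hAstep]
        have hmemR : s[n] ∉ B.1 := fun h => hmem ((ihT _).mpr h)
        refine ⟨?_, ?_, ihN, by rw [hgl], ?_⟩
        · intro c
          rw [hmem_app, hmem_app]
          exact or_congr_left (ihT c)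
        · intro c
          rw [hcnt]
          by_cases hcs : c = s[n]
          · subst hcs
            have h0 : B.1.count s[n] = 0 := List.count_eq_zero.mpr hmemR
            rw [h0, if_pos rfl]
            constructor
            · intro h; have := (ihA _).mp h; omega
            · intro h; omega
          · rw [if_neg hcs, add_zero]
            exact ihA c
        · intro x hx
          cases hx
          rw [hmem_app]; exact Or.inr rfl
    · -- same char as the previous one: both sides leave their state unchanged
      have hnew' : B.2 = some s[n] := by
        by_contra h
        exact hnew (fun hh => h hh.symm)
      have hpos : 0 < n := by
        by_contra h0
        have h0' : n = 0 := by omega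
        subst h0'
        rw [ihP] at hnew'
        simp at hnew'
      have hprev : B.2 = some s[n-1] := hprev_eq hpos
      have heqc : s[n-1] = s[n] := by
        rw [hprev] at hnew'
        exact (Option.some.injEq _ _).mp hnew'
      have hmemR : s[n] ∈ B.1 := by
        have := ihPR _ hprev
        rwa [heqc] at this
      have hmem : s[n] ∈ A.1 := (ihT _).mpr hmemR
      have hAstep : stepA s A (n : Int) = A := by
        simp only [stepA, hc, hprevA_eq hpos]
        rw [if_pos (List.elem_eq_true_of_mem hmem), if_neg (by simpa using heqc)]
      have hBstep : runStep B s[n] = B := by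
        simp [runStep, hnew']
      rw [hAstep, hBstep]
      exact ⟨ihT, ihA, ihN, by rw [hgl, hnew'], ihPR⟩

-- the sorted answer lists of the two ports coincide: both are the sorted list of
-- characters heading at least two runs
theorem sorted_eq (input_string : String) :
    PySem.List.sorted ((PySem.List.pyRange 0 (input_string.toList.length : Int) 1).foldl
        (stepA input_string.toList) ([], [])).2 (fun x => x) false
    = PySem.List.sorted (((input_string.toList.foldl runStep ([], none)).1.foldl
        (fun (d : PySem.Dict Char Int) ch => d.insert ch (d.getD ch 0 + 1)) PySem.Dict.empty).items.filterMap
        (fun p => if p.2 > 1 then some p.1 else none)) (fun x => x) false := by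
  set s := input_string.toList with hs
  obtain ⟨_, hT, hN, _, _⟩ := loop_inv s s.length le_rfl
  rw [List.take_length] at hT
  set runs := (s.foldl runStep ([], none)).1 with hruns
  have hcounter : runs.foldl (fun (d : PySem.Dict Char Int) ch => d.insert ch (d.getD ch 0 + 1)) PySem.Dict.empty
      = PySem.Dict.counter runs := PySem.Dict.foldl_insert_getD_add_one_eq_counter runs
  rw [hcounter, PySem.Dict.items_counter, List.filterMap_map]
  set dupRaw := (PySem.Set.ofList runs).filterMap
      ((fun (p : Char × Int) => if p.2 > 1 then some p.1 else none) ∘ (fun k => (k, (runs.count k : Int)))) with hdup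
  have hmemD : ∀ c, c ∈ dupRaw ↔ 2 ≤ runs.count c := by
    intro c
    rw [hdup, List.mem_filterMap]
    constructor
    · rintro ⟨a, ha, hfa⟩
      simp only [Function.comp] at hfa
      split at hfa
      · rename_i h
        cases hfa
        exact_mod_cast h
      · cases hfa
    · intro h
      refine ⟨c, ?_, ?_⟩
      · exact (PySem.Set.mem_ofList _ _).mpr (List.count_pos_iff.mp (by omega))
      · simp only [Function.comp]
        rw [if_pos (by exact_mod_cast h)]
  have hNd : dupRaw.Nodup := by
    apply List.Nodup.filterMap _ (PySem.Set.nodup_ofList runs)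
    intro a b c hac hbc
    simp only [Function.comp] at hac hbc
    split at hac <;> split at hbc <;> simp_all
  have hperm : (((PySem.List.pyRange 0 (s.length : Int) 1).foldl (stepA s) ([], [])).2).Perm dupRaw := by
    rw [List.perm_ext_iff_of_nodup hN hNd]
    intro c
    rw [hT c, hmemD c]
  exact PySem.List.sorted_eq_sorted_of_perm _ _ _ (fun a b h => h) hperm

-- ===== VERDICT (by name: the statement is the Claim_ definition above) =====
theorem solution_spec : Claim_equal_solution := by
  intro input_string _
  unfold Spec_solution
  simp only [solution, solution_alt]
  rw [sorted_eq]
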